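-- pv_equiv track=rewrite | github.com/yourant/ur_cleaner | src/tasks/vova_collector.py | get_extra_images
-- ===== SOURCE A (Python) =====
-- def get_extra_images(images):
--     extra_images = {}
--     i = 0
--     for img in images:
--         index = 'extra_image' + str(i)
--         extra_images[index] = images[img]
--         i = i + 1
--         if i == 11:
--             break
--     if len(images) < 11:
--         for j in range(10 - len(images) + 1):
--             inx = 'extra_image' + str(j + len(images))
--             extra_images[inx] = ''
--     return extra_images
-- ===== SOURCE B (Python) =====
-- def get_extra_images(images):
--     def slot(i, vs):
--         if i >= 11:
--             return []
--         if vs: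
--             v, rest = vs[0], vs[1:]
--         else:
--             v, rest = '', vs
--         return [('extra_image' + str(i), v)] + slot(i + 1, rest)
--     return dict(slot(0, list(images.values())))
-- ===== Notes on version B (the rewrite author's own statement) =====
-- stated objective: alternative
-- what changed: Replaces A's iterate-with-break copy loop plus a separate conditional backfill loop by a single recursion over the 11 output slots that consumes one value per slot (falling back to '' when the values run out) and builds the pair list front-to-back, converted to a dict at the end.
import Mathlib
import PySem

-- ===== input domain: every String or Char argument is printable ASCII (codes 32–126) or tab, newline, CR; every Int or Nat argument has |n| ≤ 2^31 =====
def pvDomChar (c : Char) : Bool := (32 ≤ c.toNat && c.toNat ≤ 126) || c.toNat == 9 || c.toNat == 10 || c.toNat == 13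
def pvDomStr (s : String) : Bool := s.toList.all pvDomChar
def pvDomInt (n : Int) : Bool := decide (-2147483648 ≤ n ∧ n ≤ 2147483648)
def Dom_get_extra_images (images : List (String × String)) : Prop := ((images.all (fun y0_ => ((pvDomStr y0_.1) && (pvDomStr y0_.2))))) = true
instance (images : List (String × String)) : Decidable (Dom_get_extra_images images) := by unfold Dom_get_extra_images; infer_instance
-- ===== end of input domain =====

-- B replaces A's iterate-with-break copy loop plus conditional backfill loop by one
-- recursion over the 11 output slots, consuming one value per slot ('' when exhausted);
-- objective: alternative decomposition.


-- ===== PORT A =====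
def pvLoopA (images : List (String × String)) :
    List (String × String) → PySem.Dict String String → Int → PySem.Dict String String
  | [], d, _ => d
  | (img, _) :: rest, d, i =>
    let d' := d.insert ("extra_image" ++ PySem.Int.toStr i) ((PySem.Dict.mk images).getD img "")
    if i + 1 = 11 then d' else pvLoopA images rest d' (i + 1)

def get_extra_images (images : List (String × String)) : List (String × String) :=
  let extra_images := pvLoopA images images PySem.Dict.empty 0
  let n : Int := images.length
  let extra_images :=
    if n < 11 then
      (PySem.List.pyRange 0 (10 - n + 1) 1).foldl
        (fun d j => d.insert ("extra_image" ++ PySem.Int.toStr (j + n)) "") extra_images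
    else extra_images
  extra_images.items

-- ===== PORT B =====
-- slot(i, vs): one output pair per slot i = 0..10, taking the head of vs (or '' if empty)
def pvSlotB (i : Nat) (vs : List String) : List (String × String) :=
  if 11 ≤ i then []
  else
    let p := match vs with
      | [] => ("", ([] : List String))
      | v :: r => (v, r)
    ("extra_image" ++ PySem.Int.toStr (i : Int), p.1) :: pvSlotB (i + 1) p.2
termination_by 11 - i

def get_extra_images_alt (images : List (String × String)) : List (String × String) :=
  (PySem.Dict.empty.update (pvSlotB 0 (images.map Prod.snd))).items

-- ===== PRECONDITION & SPEC =====
-- Pre_ excludes association lists with duplicate keys: a Python dict cannot contain them,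
-- so the ports' behaviour there is an artefact of the representation.
def Pre_get_extra_images (images : List (String × String)) : Prop :=
  (images.map Prod.fst).Nodup
instance (images : List (String × String)) : Decidable (Pre_get_extra_images images) := by unfold Pre_get_extra_images; infer_instance

def pvWitness_get_extra_images : (List (String × String)) := [("a", "x"), ("b", "y")]

def Spec_get_extra_images (images : List (String × String)) (out : List (String × String)) : Prop := out = get_extra_images_alt images
instance (images : List (String × String)) (out : List (String × String)) : Decidable (Spec_get_extra_images images out) := by unfold Spec_get_extra_images; infer_instance

-- ===== CLAIM (what is proved, stated in full; the proofs are below) =====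
def Claim_equal_get_extra_images : Prop := ∀ (images : List (String × String)), Dom_get_extra_images images → Pre_get_extra_images images → Spec_get_extra_images images (get_extra_images images)

-- ===== LEMMAS AND PROOFS =====
def pvKey (i : Int) : String := "extra_image" ++ PySem.Int.toStr i

theorem pvKey_inj : ∀ i < 11, ∀ j < 11, pvKey (i : Nat) = pvKey (j : Nat) → i = j := by decide

theorem pvKey_inj' (a b : Int) (ha0 : 0 ≤ a) (ha : a < 11) (hb0 : 0 ≤ b) (hb : b < 11)
    (he : pvKey a = pvKey b) : a = b := by
  have := pvKey_inj a.toNat (by omega) b.toNat (by omega)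
    (by rwa [Int.toNat_of_nonneg ha0, Int.toNat_of_nonneg hb0])
  omega

theorem enumerate_map {α β : Type} (f : α → β) :
    ∀ (xs : List α) (s : Int),
      PySem.List.enumerate (xs.map f) s = (PySem.List.enumerate xs s).map (fun p => (p.1, f p.2)) := by
  intro xs
  induction xs with
  | nil => intro s; rfl
  | cons x xs ih => intro s; simp [PySem.List.enumerate_cons, ih]

theorem enumerate_append {α : Type} :
    ∀ (xs ys : List α) (s : Int),
      PySem.List.enumerate (xs ++ ys) s =
        PySem.List.enumerate xs s ++ PySem.List.enumerate ys (s + xs.length) := by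
  intro xs
  induction xs with
  | nil => intro ys s; simp [PySem.List.enumerate_nil]
  | cons x xs ih =>
      intro ys s
      simp [PySem.List.enumerate_cons, ih]
      ring_nf

theorem enumerate_replicate (m : Nat) :
    ∀ (s : Int), PySem.List.enumerate (List.replicate m "") s =
      (PySem.List.pyRange s (s + m) 1).map (fun i => (i, "")) := by
  induction m with
  | zero => intro s; simp [PySem.List.enumerate_nil, PySem.List.pyRange_one_eq_nil]
  | succ m ih =>
      intro s
      rw [List.replicate_succ, PySem.List.enumerate_cons, ih (s + 1),
        PySem.List.pyRange_one_cons (by omega : s < s + (m + 1 : Nat))]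
      simp
      ring_nf

theorem pvLoopA_items (images : List (String × String)) :
    ∀ (xs : List (String × String)) (d : PySem.Dict String String) (i : Nat),
      i < 11 →
      (∀ j : Nat, i ≤ j → j < 11 → d.contains (pvKey j) = false) →
      (pvLoopA images xs d i).items =
        d.items ++ (PySem.List.enumerate (xs.take (11 - i)) i).map
          (fun p => (pvKey p.1, (PySem.Dict.mk images).getD p.2.1 "")) := by
  intro xs
  induction xs with
  | nil => intro d i hi hfresh; simp [pvLoopA, PySem.List.enumerate_nil]
  | cons p rest ih =>
    intro d i hi hfresh
    obtain ⟨img, v⟩ := p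
    have hins : (d.insert (pvKey i) ((PySem.Dict.mk images).getD img "")).items
        = d.items ++ [(pvKey i, (PySem.Dict.mk images).getD img "")] :=
      PySem.Dict.items_insert_of_not_contains d _ (hfresh i le_rfl hi)
    rw [show (11 - i) = (10 - i) + 1 by omega, List.take_succ_cons, PySem.List.enumerate_cons]
    by_cases h10 : i = 10
    · subst h10
      have hstep : pvLoopA images ((img, v) :: rest) d ((10 : Nat) : Int) =
          d.insert (pvKey ((10 : Nat) : Int)) ((PySem.Dict.mk images).getD img "") := by
        norm_num [pvLoopA, pvKey]
      rw [hstep, hins]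
      simp
    · have hlt : (i : Int) + 1 ≠ 11 := by omega
      have hstep : pvLoopA images ((img, v) :: rest) d i =
          pvLoopA images rest (d.insert (pvKey i) ((PySem.Dict.mk images).getD img "")) ((i : Int) + 1) := by
        simp [pvLoopA, pvKey, hlt]
      rw [hstep]
      have hcast : ((i : Int) + 1) = ((i + 1 : Nat) : Int) := by push_cast; ring
      rw [hcast, ih _ (i + 1) (by omega)]
      · rw [hins]
        rw [show (11 : Nat) - (i + 1) = 10 - i by omega, List.append_assoc]
        push_cast
        ring_nf
        simp
      · intro j hj hj11
        rw [PySem.Dict.contains_insert]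
        have hne : pvKey (j : Nat) ≠ pvKey (i : Nat) := fun he => by
          have := pvKey_inj j hj11 i hi he; omega
        simp [hne]
        rw [← Bool.not_eq_true, PySem.Dict.contains_iff_mem_keys]
        have := hfresh j (by omega) hj11
        rw [← Bool.not_eq_true, PySem.Dict.contains_iff_mem_keys] at this
        exact this

-- taking n elements never reaches the last pad entry, so one pad entry can be dropped
theorem take_pad (n : Nat) (r : List String) :
    (r ++ List.replicate (n + 1) "").take n = (r ++ List.replicate n "").take n := by
  rw [List.take_append, List.take_append, List.take_replicate, List.take_replicate,
    Nat.min_eq_left (by omega), Nat.min_eq_left (by omega)]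

-- B's slot recursion produces the enumerate-of-padded-prefix normal form
theorem slot_eq : ∀ (n : Nat) (i : Nat) (vs : List String), i + n = 11 →
    pvSlotB i vs = (PySem.List.enumerate ((vs ++ List.replicate n "").take n) i).map
      (fun p => (pvKey p.1, p.2)) := by
  intro n
  induction n with
  | zero =>
      intro i vs h
      unfold pvSlotB
      rw [if_pos (by omega : 11 ≤ i)]
      simp [PySem.List.enumerate_nil]
  | succ n ih =>
      intro i vs h
      unfold pvSlotB
      rw [if_neg (by omega : ¬ 11 ≤ i)]
      dsimp only
      cases vs with
      | nil =>
          rw [ih (i + 1) [] (by omega)]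
          simp only [List.nil_append, List.replicate_succ, List.take_succ_cons,
            List.take_replicate, Nat.min_self, PySem.List.enumerate_cons, List.map_cons]
          push_cast
          rfl
      | cons v r =>
          rw [ih (i + 1) r (by omega)]
          simp only [List.cons_append, List.take_succ_cons, PySem.List.enumerate_cons,
            List.map_cons, take_pad]
          push_cast
          rfl

-- B's dict over 11 distinct keys has the pair list itself as items
theorem alt_eq_map (images : List (String × String)) :
    get_extra_images_alt images =
      (PySem.List.enumerate ((images.map Prod.snd ++ List.replicate 11 "").take 11) 0).map
        (fun p => (pvKey p.1, p.2)) := by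
  unfold get_extra_images_alt PySem.Dict.update
  have hs := slot_eq 11 0 (images.map Prod.snd) rfl
  have hlen : ((images.map Prod.snd ++ List.replicate 11 "").take 11).length = 11 := by simp
  have hkeys : ((pvSlotB 0 (images.map Prod.snd)).map Prod.fst).Nodup := by
    rw [hs, List.map_map,
      show ((Prod.fst ∘ fun (p : Int × String) => (pvKey p.1, p.2)) =
        (pvKey ∘ fun (p : Int × String) => p.1)) from rfl,
      ← List.map_map, PySem.List.map_fst_enumerate, hlen]
    norm_num
    decide
  rw [PySem.Dict.items_foldl_insert_fresh (pvSlotB 0 (images.map Prod.snd))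
        Prod.fst Prod.snd PySem.Dict.empty
        (fun a _ => PySem.Dict.contains_empty _) hkeys]
  simpa using hs

theorem phase1_items (images : List (String × String))
    (h : (images.map Prod.fst).Nodup) :
    (pvLoopA images images PySem.Dict.empty 0).items =
      (PySem.List.enumerate (images.take 11) 0).map (fun p => (pvKey p.1, p.2.2)) := by
  have hget : ∀ p ∈ images, (PySem.Dict.mk images).getD p.1 "" = p.2 := by
    intro p hp
    exact PySem.Dict.getD_of_mem_items (d := PySem.Dict.mk images) (by simpa using hp) (by simpa using h) ""
  rw [show (0 : Int) = ((0 : Nat) : Int) from rfl,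
    pvLoopA_items images images PySem.Dict.empty 0 (by omega)
      (fun j _ _ => PySem.Dict.contains_empty _)]
  rw [show PySem.Dict.empty.items = ([] : List (String × String)) from rfl]
  simp only [List.nil_append, Nat.sub_zero, Nat.cast_zero]
  apply List.map_congr_left
  intro p hp
  have hmem : p.2 ∈ images.take 11 := by
    have : p.2 ∈ (PySem.List.enumerate (images.take 11) 0).map (fun q => q.2) := List.mem_map_of_mem hp
    rwa [PySem.List.map_snd_enumerate] at this
  rw [hget p.2 (List.mem_of_mem_take hmem)]

theorem get_extra_images_spec_aux (images : List (String × String))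
    (h : (images.map Prod.fst).Nodup) :
    get_extra_images images = get_extra_images_alt images := by
  unfold get_extra_images
  dsimp only
  rw [alt_eq_map]
  set m := images.length with hm
  by_cases hlt : ((m : Int) < 11)
  · -- fewer than 11 images: A backfills
    have hm11 : m < 11 := by omega
    rw [if_pos hlt]
    have htake : images.take 11 = images := List.take_of_length_le (by omega)
    have hd1 : (pvLoopA images images PySem.Dict.empty 0).items =
        (PySem.List.enumerate images 0).map (fun p => (pvKey p.1, p.2.2)) := by
      rw [phase1_items images h, htake]
    have hkeys : (pvLoopA images images PySem.Dict.empty 0).keys =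
        (PySem.List.pyRange 0 m 1).map pvKey := by
      simp only [PySem.Dict.keys, hd1, List.map_map]
      rw [show ((fun (q : String × String) => q.1) ∘ fun p => (pvKey p.1, p.2.2)) =
            (pvKey ∘ fun (p : Int × (String × String)) => p.1) from rfl,
        ← List.map_map, PySem.List.map_fst_enumerate]
      rw [← hm]
      norm_num
    rw [PySem.Dict.items_foldl_insert_fresh _
          (fun j => "extra_image" ++ PySem.Int.toStr (j + (m : Int))) (fun _ => "") _ ?_ ?_, hd1]
    · -- items equation: P1 ++ P2 = B1 ++ B2
      rw [List.take_append, List.take_of_length_le (by simp only [List.length_map, ← hm]; omega), List.take_replicate,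
        show min (11 - (images.map Prod.snd).length) 11 = 11 - m by simp only [List.length_map, ← hm]; omega,
        enumerate_append, List.map_append]
      congr 1
      · rw [enumerate_map, List.map_map]
        rfl
      · rw [show ((0 : Int) + (((images.map Prod.snd).length : Nat) : Int)) = ((m : Nat) : Int) by simp [← hm],
          enumerate_replicate, List.map_map,
          show ((m : Int) + ((11 - m : Nat) : Int)) = 11 by omega,
          show (10 - (m : Int) + 1) = 11 - (m : Int) by ring,
          PySem.List.pyRange_one ((m : Int)) 11, PySem.List.pyRange_one 0 (11 - (m : Int))]
        simp only [List.map_map]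
        norm_num
        intro a _
        simp [pvKey, Int.add_comm]
    · -- the backfill keys are fresh in the phase-1 dict
      intro j hj
      rw [PySem.List.mem_pyRange_one] at hj
      rw [← Bool.not_eq_true, PySem.Dict.contains_iff_mem_keys, hkeys]
      intro hmemk
      obtain ⟨t, ht, hte⟩ := List.mem_map.mp hmemk
      rw [PySem.List.mem_pyRange_one] at ht
      have := pvKey_inj' t (j + m) (by omega) (by omega) (by omega) (by omega) hte
      omega
    · -- the backfill keys are mutually distinct
      apply (List.nodup_map_iff_inj_on (PySem.List.nodup_pyRange_one _ _)).mpr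
      intro a ha b hb he
      rw [PySem.List.mem_pyRange_one] at ha hb
      have := pvKey_inj' (a + m) (b + m) (by omega) (by omega) (by omega)
        (by omega) he
      omega
  · -- 11 or more images: no backfill
    rw [if_neg hlt]
    rw [phase1_items images h,
      List.take_append_of_le_length (by simp [← hm]; omega), ← List.map_take, enumerate_map, List.map_map]
    rfl

-- ===== VERDICT (by name: the statement is the Claim_ definition above) =====
theorem get_extra_images_spec : Claim_equal_get_extra_images := by
  intro images _ hpre
  exact get_extra_images_spec_aux images hpre
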